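-- pv_equiv track=rewrite | github.com/pypi-data/pypi-mirror-168 | packages/Sympathy/Sympathy-4.0.1-py3-none-any.whl/sylib/odbc.py | _odbc_dummy_quote
-- ===== SOURCE A (Python) =====
-- def _odbc_dummy_quote(connection_string):
--     """
--     Replace all quoted strings with dummy text (X) including the quote
--     characters.
--     """
--     quote = None
--     chars = []
--     for char in connection_string:
--         out = 'X'
--         if quote:
--             if char == quote:
--                 quote = None
--         elif char in ['"', "'"]:
--             quote = char
--         else:
--             out = char
--         chars.append(out)
--     return ''.join(chars)
-- ===== SOURCE B (Python) =====
-- def _odbc_dummy_quote(connection_string):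
--     """Replace all quoted strings with dummy text (X) including the quotes."""
--     out = []
--     i = 0
--     n = len(connection_string)
--     while i < n:
--         c = connection_string[i]
--         if c == '"' or c == "'":
--             j = connection_string.find(c, i + 1)
--             if j == -1:
--                 out.append('X' * (n - i))
--                 i = n
--             else:
--                 out.append('X' * (j - i + 1))
--                 i = j + 1
--         else:
--             out.append(c)
--             i += 1
--     return ''.join(out)
-- ===== Notes on version B (the rewrite author's own statement) =====
-- stated objective: alternative
-- what changed: Replaces A's per-character quote-state machine with a skip-ahead scan that, at each opening quote, locates the closing quote with str.find and emits the whole X-block at once.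
import Mathlib
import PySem

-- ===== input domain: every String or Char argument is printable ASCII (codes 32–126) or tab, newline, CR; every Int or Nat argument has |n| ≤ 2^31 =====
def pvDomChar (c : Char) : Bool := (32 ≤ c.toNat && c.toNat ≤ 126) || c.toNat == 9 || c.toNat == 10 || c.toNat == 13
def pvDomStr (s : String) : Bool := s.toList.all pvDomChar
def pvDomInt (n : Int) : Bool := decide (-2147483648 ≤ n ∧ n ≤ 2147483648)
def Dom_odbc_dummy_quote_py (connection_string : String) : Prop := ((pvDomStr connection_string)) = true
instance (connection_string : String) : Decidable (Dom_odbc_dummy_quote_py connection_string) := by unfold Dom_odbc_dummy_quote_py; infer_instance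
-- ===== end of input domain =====

-- B replaces A's per-character quote-state machine with a skip-ahead scan that finds each
-- closing quote directly (str.find) and emits a block of X's at once; same output, alternative structure.

-- ===== PORT A =====
-- A's for-loop: per character, carrying the current open-quote state.
def odbcLoopA : Option Char → List Char → List Char
  | _, [] => []
  | some q, c :: rest => 'X' :: odbcLoopA (if c == q then none else some q) rest
  | none, c :: rest =>
    if c == '"' || c == '\'' then 'X' :: odbcLoopA (some c) rest
    else c :: odbcLoopA none rest

def odbc_dummy_quote_py (connection_string : String) : String :=
  String.mk (odbcLoopA none connection_string.toList)

-- ===== PORT B =====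
-- B's while-loop: at a quote, find the closing quote (idxOf? on the tail = find from i+1)
-- and emit 'X' * blocklength; otherwise copy the character.
def odbcLoopB : List Char → List Char
  | [] => []
  | c :: rest =>
    if c == '"' || c == '\'' then
      match rest.idxOf? c with
      | none => List.replicate (rest.length + 1) 'X'          -- find returned -1: X to end
      | some j => List.replicate (j + 2) 'X' ++ odbcLoopB (rest.drop (j + 1))
    else c :: odbcLoopB rest
termination_by l => l.length
decreasing_by all_goals simp

def odbc_dummy_quote_py_alt (connection_string : String) : String :=
  String.mk (odbcLoopB connection_string.toList)

-- ===== PRECONDITION & SPEC =====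
def Spec_odbc_dummy_quote_py (connection_string : String) (out : String) : Prop := out = odbc_dummy_quote_py_alt connection_string
instance (connection_string : String) (out : String) : Decidable (Spec_odbc_dummy_quote_py connection_string out) := by unfold Spec_odbc_dummy_quote_py; infer_instance

-- ===== CLAIM (what is proved, stated in full; the proofs are below) =====
def Claim_equal_odbc_dummy_quote_py : Prop := ∀ (connection_string : String), Dom_odbc_dummy_quote_py connection_string → Spec_odbc_dummy_quote_py connection_string (odbc_dummy_quote_py connection_string)

-- ===== LEMMAS AND PROOFS =====

-- Inside a quote, A emits X's up to and including the matching quote (all X's if none).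
theorem odbcLoopA_some (q : Char) (l : List Char) :
    odbcLoopA (some q) l =
      match l.idxOf? q with
      | none => List.replicate l.length 'X'
      | some j => List.replicate (j + 1) 'X' ++ odbcLoopA none (l.drop (j + 1)) := by
  induction l with
  | nil => simp [odbcLoopA, List.idxOf?]
  | cons c rest ih =>
    rw [odbcLoopA, List.idxOf?_cons]
    by_cases h : c == q
    · simp [h]
    · simp only [h, if_neg, Bool.false_eq_true, not_false_iff, ih]
      cases hfind : rest.idxOf? q with
      | none => simp [List.replicate_succ]
      | some j =>
        simp [List.replicate_succ]

theorem odbcLoop_eq (l : List Char) : odbcLoopA none l = odbcLoopB l := by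
  induction l using odbcLoopB.induct with
  | case1 => simp [odbcLoopA, odbcLoopB]
  | case2 c rest hq hfind =>
    rw [odbcLoopA, odbcLoopB, if_pos hq, if_pos hq, hfind, odbcLoopA_some, hfind]
    simp [List.replicate_succ]
  | case3 c rest hq j hfind ih =>
    rw [odbcLoopA, odbcLoopB, if_pos hq, if_pos hq, hfind, odbcLoopA_some, hfind]
    simp [List.replicate_succ, ih]
  | case4 c rest hq ih =>
    rw [odbcLoopA, odbcLoopB, if_neg hq, if_neg hq, ih]

-- ===== VERDICT (by name: the statement is the Claim_ definition above) =====
theorem odbc_dummy_quote_py_spec : Claim_equal_odbc_dummy_quote_py := by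
  intro s _
  unfold Spec_odbc_dummy_quote_py odbc_dummy_quote_py odbc_dummy_quote_py_alt
  rw [odbcLoop_eq]
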